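-- pv_equiv track=rewrite | github.com/DynaHug-Detector/DynaHug | experiments/scripts/cluster_checker.py | analyze_tag_categories
-- ===== SOURCE A (Python) =====
-- def analyze_tag_categories(tags):
--     """
--     Group tags into categories based on common patterns.
--     """
--     categories = {
--         "Text/NLP": [],
--         "Image/Vision": [],
--         "Audio/Speech": [],
--         "Video": [],
--         "Generation": [],
--         "Classification": [],
--         "Detection": [],
--         "Languages": [],
--         "Other": [],
--     }
--
--     for tag in tags:
--         tag_lower = tag.lower()
--
--         languages = [
--             "english",
--             "chinese",
--             "arabic",
--             "turkish",
--             "spanish",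
--             "french",
--             "german",
--             "hindi",
--             "indonesian",
--             "korean",
--             "japanese",
--             "portuguese",
--             "russian",
--             "bengali",
--         ]
--         if any(lang in tag_lower for lang in languages):
--             categories["Languages"].append(tag)
--
--         elif any(
--             keyword in tag_lower
--             for keyword in [
--                 "text",
--                 "nlp",
--                 "sentiment",
--                 "translation",
--                 "summarization",
--                 "named-entity",
--                 "word",
--                 "language",
--                 "conversational",
--                 "chat",
--             ]
--         ):
--             categories["Text/NLP"].append(tag)
--
--         elif any(
--             keyword in tag_lower
--             for keyword in [
--                 "image",
--                 "vision",
--                 "visual",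
--                 "face",
--                 "object",
--                 "segmentation",
--                 "ocr",
--             ]
--         ):
--             categories["Image/Vision"].append(tag)
--
--         elif any(
--             keyword in tag_lower for keyword in ["audio", "speech", "voice", "sound"]
--         ):
--             categories["Audio/Speech"].append(tag)
--
--         elif "video" in tag_lower:
--             categories["Video"].append(tag)
--
--         elif any(
--             keyword in tag_lower
--             for keyword in ["generation", "generative", "synthesis", "to-"]
--         ):
--             categories["Generation"].append(tag)
--
--         elif "classification" in tag_lower:
--             categories["Classification"].append(tag)
--
--         elif "detection" in tag_lower:
--             categories["Detection"].append(tag)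
--
--         else:
--             categories["Other"].append(tag)
--
--     return categories
-- ===== SOURCE B (Python) =====
-- # B: ordered dispatch table + one classifier; the result dict is built per
-- # category as a comprehension instead of A's nine-way elif cascade with appends.
--
-- CATEGORY_TABLE = [
--     ("Languages", ["english", "chinese", "arabic", "turkish", "spanish",
--                    "french", "german", "hindi", "indonesian", "korean",
--                    "japanese", "portuguese", "russian", "bengali"]),
--     ("Text/NLP", ["text", "nlp", "sentiment", "translation", "summarization",
--                   "named-entity", "word", "language", "conversational", "chat"]),
--     ("Image/Vision", ["image", "vision", "visual", "face", "object",
--                       "segmentation", "ocr"]),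
--     ("Audio/Speech", ["audio", "speech", "voice", "sound"]),
--     ("Video", ["video"]),
--     ("Generation", ["generation", "generative", "synthesis", "to-"]),
--     ("Classification", ["classification"]),
--     ("Detection", ["detection"]),
-- ]
--
-- CATEGORY_ORDER = ["Text/NLP", "Image/Vision", "Audio/Speech", "Video",
--                   "Generation", "Classification", "Detection", "Languages", "Other"]
--
--
-- def _classify(tag):
--     tag_lower = tag.lower()
--     return next((cat for cat, kws in CATEGORY_TABLE
--                  if any(kw in tag_lower for kw in kws)), "Other")
--
--
-- def analyze_tag_categories(tags):
--     labels = [_classify(t) for t in tags]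
--     return {cat: [t for t, lab in zip(tags, labels) if lab == cat]
--             for cat in CATEGORY_ORDER}
-- ===== Notes on version B (the rewrite author's own statement) =====
-- stated objective: simpler
-- what changed: Replaces the nine-way elif cascade that appends into a mutable dict with an ordered keyword dispatch table plus a single classifier function, building each category's list by one per-category comprehension.
import Mathlib
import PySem

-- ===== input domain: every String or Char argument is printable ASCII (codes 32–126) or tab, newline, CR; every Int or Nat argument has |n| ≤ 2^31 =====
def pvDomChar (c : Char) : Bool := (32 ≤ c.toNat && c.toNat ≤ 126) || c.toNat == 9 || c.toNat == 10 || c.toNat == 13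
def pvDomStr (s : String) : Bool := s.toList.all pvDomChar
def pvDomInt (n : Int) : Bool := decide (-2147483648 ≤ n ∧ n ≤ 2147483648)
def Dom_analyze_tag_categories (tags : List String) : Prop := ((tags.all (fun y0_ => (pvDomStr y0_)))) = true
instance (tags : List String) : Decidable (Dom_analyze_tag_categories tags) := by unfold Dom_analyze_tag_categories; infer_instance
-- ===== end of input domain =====

-- B replaces A's nine-way elif cascade with an ordered dispatch table and a single
-- classifier, building each category's list by one comprehension (simpler, same cost).

-- shared keyword data ('any(kw in tag_lower for kw in kws)' = pvHit kws tag_lower)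
def pvHit (kws : List String) (tl : String) : Bool := kws.any (fun k => PySem.Str.isIn k tl)

def pvLangKws : List String :=
  ["english", "chinese", "arabic", "turkish", "spanish", "french", "german",
   "hindi", "indonesian", "korean", "japanese", "portuguese", "russian", "bengali"]
def pvTextKws : List String :=
  ["text", "nlp", "sentiment", "translation", "summarization", "named-entity",
   "word", "language", "conversational", "chat"]
def pvImgKws : List String :=
  ["image", "vision", "visual", "face", "object", "segmentation", "ocr"]
def pvAudKws : List String := ["audio", "speech", "voice", "sound"]
def pvGenKws : List String := ["generation", "generative", "synthesis", "to-"]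

-- ===== PORT A =====
def pvInitCats : PySem.Dict String (List String) :=
  PySem.Dict.ofList
    [("Text/NLP", []), ("Image/Vision", []), ("Audio/Speech", []), ("Video", []),
     ("Generation", []), ("Classification", []), ("Detection", []),
     ("Languages", []), ("Other", [])]

-- one iteration of A's for-loop ('categories[k].append(tag)' = modify k (· ++ [tag]))
def pvStepA (d : PySem.Dict String (List String)) (tag : String) :
    PySem.Dict String (List String) :=
  let tl := PySem.Str.lower tag
  if pvHit pvLangKws tl then d.modify "Languages" [] (· ++ [tag])
  else if pvHit pvTextKws tl then d.modify "Text/NLP" [] (· ++ [tag])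
  else if pvHit pvImgKws tl then d.modify "Image/Vision" [] (· ++ [tag])
  else if pvHit pvAudKws tl then d.modify "Audio/Speech" [] (· ++ [tag])
  else if PySem.Str.isIn "video" tl then d.modify "Video" [] (· ++ [tag])
  else if pvHit pvGenKws tl then d.modify "Generation" [] (· ++ [tag])
  else if PySem.Str.isIn "classification" tl then d.modify "Classification" [] (· ++ [tag])
  else if PySem.Str.isIn "detection" tl then d.modify "Detection" [] (· ++ [tag])
  else d.modify "Other" [] (· ++ [tag])

def analyze_tag_categories (tags : List String) : List (String × List String) :=
  (tags.foldl pvStepA pvInitCats).items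

-- ===== PORT B =====
def pvTable : List (String × List String) :=
  [("Languages", pvLangKws), ("Text/NLP", pvTextKws), ("Image/Vision", pvImgKws),
   ("Audio/Speech", pvAudKws), ("Video", ["video"]), ("Generation", pvGenKws),
   ("Classification", ["classification"]), ("Detection", ["detection"])]

def pvOrder : List String :=
  ["Text/NLP", "Image/Vision", "Audio/Speech", "Video", "Generation",
   "Classification", "Detection", "Languages", "Other"]

def pvClassify (tag : String) : String :=
  let tl := PySem.Str.lower tag
  match pvTable.find? (fun p => pvHit p.2 tl) with
  | some p => p.1
  | none => "Other"

def analyze_tag_categories_alt (tags : List String) : List (String × List String) :=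
  let labels := tags.map pvClassify
  pvOrder.map (fun c => (c, ((tags.zip labels).filter (fun p => p.2 == c)).map (·.1)))

-- ===== PRECONDITION & SPEC =====
def Spec_analyze_tag_categories (tags : List String) (out : List (String × List String)) : Prop := out = analyze_tag_categories_alt tags
instance (tags : List String) (out : List (String × List String)) : Decidable (Spec_analyze_tag_categories tags out) := by unfold Spec_analyze_tag_categories; infer_instance

-- ===== CLAIM (what is proved, stated in full; the proofs are below) =====
def Claim_equal_analyze_tag_categories : Prop := ∀ (tags : List String), Dom_analyze_tag_categories tags → Spec_analyze_tag_categories tags (analyze_tag_categories tags)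

-- ===== LEMMAS AND PROOFS =====

-- A's chosen key for a tag (read off A's elif chain)
def pvKeyA (tag : String) : String :=
  let tl := PySem.Str.lower tag
  if pvHit pvLangKws tl then "Languages"
  else if pvHit pvTextKws tl then "Text/NLP"
  else if pvHit pvImgKws tl then "Image/Vision"
  else if pvHit pvAudKws tl then "Audio/Speech"
  else if PySem.Str.isIn "video" tl then "Video"
  else if pvHit pvGenKws tl then "Generation"
  else if PySem.Str.isIn "classification" tl then "Classification"
  else if PySem.Str.isIn "detection" tl then "Detection"
  else "Other"

lemma pvStepA_eq (d : PySem.Dict String (List String)) (tag : String) :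
    pvStepA d tag = d.modify (pvKeyA tag) [] (· ++ [tag]) := by
  simp only [pvStepA, pvKeyA]
  split_ifs <;> rfl

lemma pvHit_singleton (k tl : String) : pvHit [k] tl = PySem.Str.isIn k tl := by
  simp [pvHit]

lemma pvFind?_cons_ite {α : Type} (p : α → Bool) (a : α) (l : List α) :
    (a :: l).find? p = if p a then some a else l.find? p := by
  cases h : p a <;> simp [List.find?, h]

lemma pvKeyA_eq_classify (tag : String) : pvKeyA tag = pvClassify tag := by
  simp only [pvKeyA, pvClassify, pvTable, pvFind?_cons_ite, List.find?_nil, pvHit_singleton]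
  split_ifs <;> rfl

lemma pvKeyA_mem (tag : String) : pvKeyA tag ∈ pvOrder := by
  simp only [pvKeyA]
  split_ifs <;> decide

lemma pvFoldA_eq (tags : List String) (d : PySem.Dict String (List String)) :
    tags.foldl pvStepA d =
      (tags.map (fun t => (pvKeyA t, t))).foldl
        (fun d p => d.modify p.1 [] (· ++ [p.2])) d := by
  induction tags generalizing d with
  | nil => rfl
  | cons t ts ih => simp [List.foldl, pvStepA_eq, ih]

lemma pvZipFilter (tags : List String) (c : String) :
    ((tags.zip (tags.map pvClassify)).filter (fun p => p.2 == c)).map (·.1)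
      = tags.filter (fun t => pvClassify t == c) := by
  induction tags with
  | nil => rfl
  | cons t ts ih =>
    simp only [List.map, List.zip_cons_cons, List.filter]
    cases h : (pvClassify t == c) <;> simp_all

set_option maxHeartbeats 1000000 in
theorem analyze_tag_categories_spec : Claim_equal_analyze_tag_categories := by
  intro tags _
  show analyze_tag_categories tags = analyze_tag_categories_alt tags
  simp only [analyze_tag_categories, analyze_tag_categories_alt]
  rw [pvFoldA_eq]
  set l := tags.map (fun t => (pvKeyA t, t)) with hl
  have hinit : pvInitCats.keys = pvOrder := by decide
  have hkeys : ((l.foldl (fun d p => d.modify p.1 [] (· ++ [p.2])) pvInitCats)).keys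
      = pvInitCats.keys := by
    rw [PySem.Dict.keys_foldl_modify_key, PySem.Set.update_eq_append_filter]
    have hnil : (PySem.Set.ofList (l.map Prod.fst)).filter
        (fun y => !(PySem.Set.contains pvInitCats.keys y)) = [] := by
      rw [List.filter_eq_nil_iff]
      intro y hy
      rw [PySem.Set.mem_ofList, hl, List.map_map] at hy
      simp only [Function.comp_def] at hy
      obtain ⟨t, -, rfl⟩ := List.mem_map.mp hy
      have hmem : pvKeyA t ∈ pvInitCats.keys := by rw [hinit]; exact pvKeyA_mem t
      simp
      exact hmem
    rw [hnil, List.append_nil]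
  have hnd : ((l.foldl (fun d p => d.modify p.1 [] (· ++ [p.2])) pvInitCats)).keys.Nodup := by
    rw [hkeys, hinit]; decide
  rw [PySem.Dict.items_eq_map_keys _ hnd ([] : List String), hkeys, hinit]
  apply List.map_congr_left
  intro c hc
  have hgetD : ∀ c ∈ pvOrder, pvInitCats.getD c ([] : List String) = [] := by decide
  rw [PySem.Dict.getD_foldl_modify_append, hgetD c hc, List.nil_append]
  have hfm : (l.filter (fun p => p.1 == c)).map (·.2)
      = tags.filter (fun t => pvKeyA t == c) := by
    rw [hl, List.filter_map, List.map_map]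
    simp [Function.comp_def]
  rw [hfm, pvZipFilter]
  congr 1
  exact List.filter_congr (fun t _ => by rw [pvKeyA_eq_classify])
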